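-- pv_equiv track=rewrite | github.com/Sa4dUs/geometria-computacional | src/9-invented-triangulation-method.py | divide_polygon
-- ===== SOURCE A (Python) =====
-- def divide_polygon(poly, i, j):
--     n = len(poly)
--     p1 = []
--     k = i
--     while True:
--         p1.append(poly[k])
--         if k == j:
--             break
--         k = (k + 1) % n
--     p2 = []
--     k = j
--     while True:
--         p2.append(poly[k])
--         if k == i:
--             break
--         k = (k + 1) % n
--     return p1, p2
-- ===== SOURCE B (Python) =====
-- def divide_polygon(poly, i, j):
--     p1 = (poly[i:j] if i <= j else poly[i:] + poly[:j]) + [poly[j]]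
--     p2 = (poly[j:i] if j <= i else poly[j:] + poly[:i]) + [poly[i]]
--     return p1, p2
-- ===== Notes on version B (the rewrite author's own statement) =====
-- stated objective: simpler
-- what changed: Replaces the two per-element circular while-loops by a comparison plus slicing: each part is the half-open slice (wrapped across the end when needed) followed by the inclusive endpoint vertex.
import Mathlib
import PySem

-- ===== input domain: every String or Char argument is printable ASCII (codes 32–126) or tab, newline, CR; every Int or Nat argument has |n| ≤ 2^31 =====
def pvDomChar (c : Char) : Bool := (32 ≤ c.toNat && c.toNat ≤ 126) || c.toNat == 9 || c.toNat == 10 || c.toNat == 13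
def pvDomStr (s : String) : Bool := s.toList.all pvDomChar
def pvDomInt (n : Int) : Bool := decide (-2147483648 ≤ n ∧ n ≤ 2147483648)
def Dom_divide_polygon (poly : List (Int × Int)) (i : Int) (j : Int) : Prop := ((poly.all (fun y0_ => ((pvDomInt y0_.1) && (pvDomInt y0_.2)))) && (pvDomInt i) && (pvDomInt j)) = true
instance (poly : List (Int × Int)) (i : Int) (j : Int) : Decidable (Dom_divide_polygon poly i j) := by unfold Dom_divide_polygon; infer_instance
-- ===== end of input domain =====

-- B replaces A's per-element circular append loops by a comparison plus slicing: half-open slice (wrapped when needed) + the inclusive endpoint vertex (simpler, same cost).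


-- ===== PORT A =====
-- A's 'while True: append poly[k]; break if k == stop; k = (k+1) % n' loop; fuel makes it total
-- (under Pre_ the loop performs at most poly.length appends, so fuel poly.length + 1 is never exhausted).
def dpWalk (poly : List (Int × Int)) (n : Int) (stop : Int) : Nat → Int → List (Int × Int) → List (Int × Int)
  | 0, _, acc => acc
  | fuel + 1, k, acc =>
      let acc := acc ++ [PySem.List.pyGetD poly k (0, 0)]
      if k = stop then acc else dpWalk poly n stop fuel (PySem.Int.mod (k + 1) n) acc

def divide_polygon (poly : List (Int × Int)) (i : Int) (j : Int) : (List (Int × Int)) × (List (Int × Int)) :=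
  let n : Int := poly.length
  let p1 := dpWalk poly n j (poly.length + 1) i []
  let p2 := dpWalk poly n i (poly.length + 1) j []
  (p1, p2)

-- ===== PORT B =====
def divide_polygon_alt (poly : List (Int × Int)) (i : Int) (j : Int) : (List (Int × Int)) × (List (Int × Int)) :=
  let p1 := (if i ≤ j then PySem.List.slice poly (some i) (some j)
             else PySem.List.slice poly (some i) none ++ PySem.List.slice poly none (some j))
            ++ [PySem.List.pyGetD poly j (0, 0)]
  let p2 := (if j ≤ i then PySem.List.slice poly (some j) (some i)
             else PySem.List.slice poly (some j) none ++ PySem.List.slice poly none (some i))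
            ++ [PySem.List.pyGetD poly i (0, 0)]
  (p1, p2)

-- ===== PRECONDITION & SPEC =====
-- Pre_ is exactly the set of inputs on which A returns: elsewhere A raises (poly empty, or an index
-- outside [-n, n)) or loops forever (a negative in-range index with i ≠ j never matches the wrapped
-- nonnegative loop counter again). The only negative indices A returns on are i = j, kept inside Pre_.
def Pre_divide_polygon (poly : List (Int × Int)) (i : Int) (j : Int) : Prop :=
  poly ≠ [] ∧ ((0 ≤ i ∧ i < poly.length ∧ 0 ≤ j ∧ j < poly.length) ∨
               (-(poly.length : Int) ≤ i ∧ i < 0 ∧ i = j))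
instance (poly : List (Int × Int)) (i : Int) (j : Int) : Decidable (Pre_divide_polygon poly i j) := by unfold Pre_divide_polygon; infer_instance

def pvWitness_divide_polygon : (List (Int × Int)) × Int × Int := ([(0, 0), (2, 0), (1, 3)], 0, 2)

def Spec_divide_polygon (poly : List (Int × Int)) (i : Int) (j : Int) (out : (List (Int × Int)) × (List (Int × Int))) : Prop := out = divide_polygon_alt poly i j
instance (poly : List (Int × Int)) (i : Int) (j : Int) (out : (List (Int × Int)) × (List (Int × Int))) : Decidable (Spec_divide_polygon poly i j out) := by unfold Spec_divide_polygon; infer_instance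

-- ===== CLAIM (what is proved, stated in full; the proofs are below) =====
def Claim_equal_divide_polygon : Prop := ∀ (poly : List (Int × Int)) (i : Int) (j : Int), Dom_divide_polygon poly i j → Pre_divide_polygon poly i j → Spec_divide_polygon poly i j (divide_polygon poly i j)

-- ===== LEMMAS AND PROOFS =====

theorem dpGet_nat (poly : List (Int × Int)) (a : Nat) (ha : a < poly.length) :
    PySem.List.pyGetD poly (a : Int) (0, 0) = poly[a] := by
  simp [PySem.List.pyGetD_natCast, List.getD_eq_getElem?_getD, List.getElem?_eq_getElem ha]

theorem dpMod_nat (poly : List (Int × Int)) (a : Nat) (ha : a < poly.length) :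
    PySem.Int.mod ((a : Int) + 1) (poly.length : Int)
      = (((a + 1) % poly.length : Nat) : Int) := by
  rw [PySem.Int.mod_eq_emod_of_pos (by exact_mod_cast (by omega : 0 < poly.length))]
  push_cast
  rfl

theorem dpWalk_le (poly : List (Int × Int)) (b : Nat) (hb : b < poly.length) :
    ∀ (d a : Nat), a + d = b → ∀ (fuel : Nat) (acc : List (Int × Int)), d < fuel →
      dpWalk poly (poly.length : Int) (b : Int) fuel (a : Int) acc
        = acc ++ (poly.drop a).take (b + 1 - a) := by
  intro d
  induction d with
  | zero =>
      intro a ha fuel acc hf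
      obtain ⟨f, rfl⟩ : ∃ f, fuel = f + 1 := ⟨fuel - 1, by omega⟩
      have hab : a = b := by omega
      subst hab
      rw [dpWalk, if_pos rfl, dpGet_nat poly a hb]
      have h1 : a + 1 - a = 1 := by omega
      rw [h1, List.drop_eq_getElem_cons hb, List.take_succ_cons, List.take_zero]
  | succ d ih =>
      intro a ha fuel acc hf
      obtain ⟨f, rfl⟩ : ∃ f, fuel = f + 1 := ⟨fuel - 1, by omega⟩
      have hane : (a : Int) ≠ (b : Int) := by exact_mod_cast (by omega : a ≠ b)
      have ha1 : a < poly.length := by omega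
      have hmodn : (a + 1) % poly.length = a + 1 := Nat.mod_eq_of_lt (by omega)
      rw [dpWalk, if_neg hane, dpMod_nat poly a ha1, hmodn,
          ih (a + 1) (by omega) f _ (by omega)]
      have htake : (poly.drop a).take (b + 1 - a)
          = poly[a] :: (poly.drop (a + 1)).take (b + 1 - (a + 1)) := by
        rw [List.drop_eq_getElem_cons ha1]
        have h2 : b + 1 - a = (b + 1 - (a + 1)) + 1 := by omega
        rw [h2, List.take_succ_cons]
      rw [htake, dpGet_nat poly a ha1]
      simp

theorem dpWalk_gt (poly : List (Int × Int)) (b : Nat) (hb : b < poly.length) :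
    ∀ (d a : Nat), poly.length - a = d → b < a → a < poly.length →
      ∀ (fuel : Nat) (acc : List (Int × Int)), poly.length - a + b < fuel →
      dpWalk poly (poly.length : Int) (b : Int) fuel (a : Int) acc
        = acc ++ poly.drop a ++ poly.take (b + 1) := by
  intro d
  induction d with
  | zero => intro a hd hba hal fuel acc hf; omega
  | succ d ih =>
      intro a hd hba hal fuel acc hf
      obtain ⟨f, rfl⟩ : ∃ f, fuel = f + 1 := ⟨fuel - 1, by omega⟩
      have hane : (a : Int) ≠ (b : Int) := by exact_mod_cast (by omega : a ≠ b)
      rw [dpWalk, if_neg hane, dpMod_nat poly a hal]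
      by_cases hend : a + 1 = poly.length
      · have hmodn : (a + 1) % poly.length = 0 := by rw [hend]; exact Nat.mod_self _
        rw [hmodn, dpWalk_le poly b hb b 0 (by omega) f _ (by omega)]
        have hdrop : poly.drop a = [poly[a]] := by
          rw [List.drop_eq_getElem_cons hal, List.drop_eq_nil_of_le (by omega)]
        rw [dpGet_nat poly a hal, hdrop]
        simp
      · have hmodn : (a + 1) % poly.length = a + 1 := Nat.mod_eq_of_lt (by omega)
        rw [hmodn, ih (a + 1) (by omega) (by omega) (by omega) f _ (by omega)]
        have hdrop : poly.drop a = poly[a] :: poly.drop (a + 1) :=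
          List.drop_eq_getElem_cons hal
        rw [dpGet_nat poly a hal, hdrop]
        simp

theorem dpWalk_run (poly : List (Int × Int)) (a b : Nat)
    (ha : a < poly.length) (hb : b < poly.length) :
    dpWalk poly (poly.length : Int) (b : Int) (poly.length + 1) (a : Int) []
      = if a ≤ b then (poly.drop a).take (b + 1 - a)
        else poly.drop a ++ poly.take (b + 1) := by
  by_cases h : a ≤ b
  · rw [if_pos h, dpWalk_le poly b hb (b - a) a (by omega) _ _ (by omega)]
    simp
  · rw [if_neg h, dpWalk_gt poly b hb (poly.length - a) a rfl (by omega) ha _ _ (by omega)]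
    simp

theorem sliceB_run (poly : List (Int × Int)) (a b : Nat)
    (hb : b < poly.length) :
    (if (a : Int) ≤ (b : Int) then PySem.List.slice poly (some (a : Int)) (some (b : Int))
     else PySem.List.slice poly (some (a : Int)) none ++ PySem.List.slice poly none (some (b : Int)))
      ++ [PySem.List.pyGetD poly (b : Int) (0, 0)]
      = if a ≤ b then (poly.drop a).take (b + 1 - a)
        else poly.drop a ++ poly.take (b + 1) := by
  rw [dpGet_nat poly b hb]
  by_cases h : a ≤ b
  · rw [if_pos (by exact_mod_cast h), if_pos h, PySem.List.slice_natCast]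
    have h1 : b + 1 - a = (b - a) + 1 := by omega
    rw [h1, List.take_add_one]
    have h2 : (poly.drop a)[b - a]? = some poly[b] := by
      rw [List.getElem?_drop, show a + (b - a) = b from by omega]
      exact List.getElem?_eq_getElem hb
    rw [h2]
    rfl
  · rw [if_neg (by exact_mod_cast h), if_neg h,
        PySem.List.slice_from_natCast, PySem.List.slice_to_natCast,
        List.take_add_one, List.getElem?_eq_getElem hb]
    simp

theorem slice_self_nil (poly : List (Int × Int)) (a : Int) :
    PySem.List.slice poly (some a) (some a) = [] :=
  List.eq_nil_of_length_eq_zero (by rw [PySem.List.length_slice]; omega)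

-- ===== VERDICT (by name: the statement is the Claim_ definition above) =====
theorem divide_polygon_spec : Claim_equal_divide_polygon := by
  intro poly i j _ hpre
  obtain ⟨hne, hcase⟩ := hpre
  have hlen : 0 < poly.length := List.length_pos_of_ne_nil hne
  unfold Spec_divide_polygon
  simp only [divide_polygon, divide_polygon_alt]
  rcases hcase with ⟨hi0, hin, hj0, hjn⟩ | ⟨hin, hi0, hij⟩
  · obtain ⟨a, rfl⟩ : ∃ a : Nat, i = (a : Int) := ⟨i.toNat, by omega⟩
    obtain ⟨b, rfl⟩ : ∃ b : Nat, j = (b : Int) := ⟨j.toNat, by omega⟩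
    have ha : a < poly.length := by exact_mod_cast hin
    have hbn : b < poly.length := by exact_mod_cast hjn
    rw [dpWalk_run poly a b ha hbn, dpWalk_run poly b a hbn ha]
    rw [sliceB_run poly a b hbn, sliceB_run poly b a ha]
  · subst hij
    obtain ⟨f, hfuel⟩ : ∃ f, poly.length + 1 = f + 1 := ⟨poly.length, rfl⟩
    have hwalk : dpWalk poly (poly.length : Int) i (poly.length + 1) i []
        = [PySem.List.pyGetD poly i (0, 0)] := by
      rw [hfuel, dpWalk, if_pos rfl]; simp
    rw [hwalk, if_pos (le_refl i), slice_self_nil]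
    simp
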